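-- pv_equiv track=rewrite | github.com/zekrowm/transit_planning_with_python | scripts/gtfs_exports/bus_schedule_exporter.py | map_service_id_to_schedule
-- ===== SOURCE A (Python) =====
-- def map_service_id_to_schedule(service_row_local):
--     """
--     Maps a service_id row to a 'type' label based on the days it serves.
--     """
--     days = [
--         "monday",
--         "tuesday",
--         "wednesday",
--         "thursday",
--         "friday",
--         "saturday",
--         "sunday",
--     ]
--     served_days = [day for day in days if service_row_local.get(day, "0") == "1"]
--
--     weekday = {"monday", "tuesday", "wednesday", "thursday", "friday"}
--     weekday_except_friday = {"monday", "tuesday", "wednesday", "thursday"}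
--     saturday = {"saturday"}
--     sunday = {"sunday"}
--     weekend = {"saturday", "sunday"}
--     daily = set(days)
--
--     schedule_label = "Holiday"
--     if served_days:
--         served_set = set(served_days)
--         if served_set == weekday:
--             schedule_label = "Weekday"
--         elif served_set == weekday_except_friday:
--             schedule_label = "Weekday_except_Friday"
--         elif served_set == saturday:
--             schedule_label = "Saturday"
--         elif served_set == sunday:
--             schedule_label = "Sunday"
--         elif served_set == weekend:
--             schedule_label = "Weekend"
--         elif served_set == {"friday", "saturday"}:
--             schedule_label = "Friday-Saturday"
--         elif served_set == daily:
--             schedule_label = "Daily"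
--         else:
--             schedule_label = "Special"  # Could be a custom name based on days
--     return schedule_label
-- ===== SOURCE B (Python) =====
-- _DAYS = [
--     "monday",
--     "tuesday",
--     "wednesday",
--     "thursday",
--     "friday",
--     "saturday",
--     "sunday",
-- ]
--
-- # labels keyed by a 7-bit mask: bit i set <=> _DAYS[i] is served
-- _LABELS = {
--     0b0000000: "Holiday",
--     0b0011111: "Weekday",
--     0b0001111: "Weekday_except_Friday",
--     0b0100000: "Saturday",
--     0b1000000: "Sunday",
--     0b1100000: "Weekend",
--     0b0110000: "Friday-Saturday",
--     0b1111111: "Daily",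
-- }
--
--
-- def map_service_id_to_schedule(service_row_local):
--     """Maps a service_id row to a 'type' label based on the days it serves."""
--     mask = 0
--     for i, day in enumerate(_DAYS):
--         if service_row_local.get(day, "0") == "1":
--             mask |= 1 << i
--     return _LABELS.get(mask, "Special")
-- ===== Notes on version B (the rewrite author's own statement) =====
-- stated objective: alternative
-- what changed: Encodes the served days as a 7-bit integer bitmask built in a single enumerate fold (no list/set of day names is materialized) and classifies by an integer-keyed lookup with default 'Special', instead of building a served-days list and comparing its set against seven candidate sets in an if/elif chain.
import Mathlib
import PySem

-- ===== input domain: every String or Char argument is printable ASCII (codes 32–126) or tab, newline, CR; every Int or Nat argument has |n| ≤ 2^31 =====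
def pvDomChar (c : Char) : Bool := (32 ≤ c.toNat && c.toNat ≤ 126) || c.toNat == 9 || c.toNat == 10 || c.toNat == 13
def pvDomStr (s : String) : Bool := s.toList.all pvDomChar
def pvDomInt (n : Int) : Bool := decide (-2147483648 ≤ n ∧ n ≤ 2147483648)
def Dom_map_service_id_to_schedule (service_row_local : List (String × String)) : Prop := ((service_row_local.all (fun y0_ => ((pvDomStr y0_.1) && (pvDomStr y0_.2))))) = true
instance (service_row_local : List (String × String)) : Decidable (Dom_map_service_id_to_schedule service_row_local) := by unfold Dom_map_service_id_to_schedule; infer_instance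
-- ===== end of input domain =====

-- B encodes the served days as a 7-bit integer bitmask built in one enumerate fold and classifies by an
-- integer-keyed lookup (default "Special"), instead of A's served-days list and if/elif set-equality chain (alternative; no speed claim).

-- ===== PORT A =====
def pvDaysA : List String :=
  ["monday", "tuesday", "wednesday", "thursday", "friday", "saturday", "sunday"]

-- the if/elif chain over served_set (set equality = PySem.Set.equal, Python's ==)
def pvChainA (served_days : List String) : String :=
  -- `if served_days:` with the prior `schedule_label = "Holiday"` as the fall-through
  if served_days.isEmpty then "Holiday"
  else
    let served_set := PySem.Set.ofList served_days
    if PySem.Set.equal served_set (PySem.Set.ofList ["monday", "tuesday", "wednesday", "thursday", "friday"]) then "Weekday"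
    else if PySem.Set.equal served_set (PySem.Set.ofList ["monday", "tuesday", "wednesday", "thursday"]) then "Weekday_except_Friday"
    else if PySem.Set.equal served_set (PySem.Set.ofList ["saturday"]) then "Saturday"
    else if PySem.Set.equal served_set (PySem.Set.ofList ["sunday"]) then "Sunday"
    else if PySem.Set.equal served_set (PySem.Set.ofList ["saturday", "sunday"]) then "Weekend"
    else if PySem.Set.equal served_set (PySem.Set.ofList ["friday", "saturday"]) then "Friday-Saturday"
    else if PySem.Set.equal served_set (PySem.Set.ofList pvDaysA) then "Daily"
    else "Special"

def map_service_id_to_schedule (service_row_local : List (String × String)) : String :=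
  let served_days := pvDaysA.filter (fun day => PySem.Dict.getD (PySem.Dict.mk service_row_local) day "0" == "1")
  pvChainA served_days

-- ===== PORT B =====
def pvDaysB : List String :=
  ["monday", "tuesday", "wednesday", "thursday", "friday", "saturday", "sunday"]

-- _LABELS: labels keyed by the 7-bit mask (bit i set <=> pvDaysB[i] served)
def pvLabelsB : List (Int × String) :=
  [ (0, "Holiday"), (31, "Weekday"), (15, "Weekday_except_Friday"), (32, "Saturday"),
    (64, "Sunday"), (96, "Weekend"), (48, "Friday-Saturday"), (127, "Daily") ]

def map_service_id_to_schedule_alt (service_row_local : List (String × String)) : String :=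
  -- mask = 0; for i, day in enumerate(_DAYS): if row.get(day,"0") == "1": mask |= 1 << i
  let mask : Int := (PySem.List.enumerate pvDaysB).foldl
    (fun m p =>
      if PySem.Dict.getD (PySem.Dict.mk service_row_local) p.2 "0" == "1"
      then PySem.Int.bor m ((1 : Int) <<< p.1.toNat)   -- i is always ≥ 0 here
      else m) 0
  PySem.Dict.getD (PySem.Dict.mk pvLabelsB) mask "Special"

-- ===== PRECONDITION & SPEC =====
def Spec_map_service_id_to_schedule (service_row_local : List (String × String)) (out : String) : Prop := out = map_service_id_to_schedule_alt service_row_local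
instance (service_row_local : List (String × String)) (out : String) : Decidable (Spec_map_service_id_to_schedule service_row_local out) := by unfold Spec_map_service_id_to_schedule; infer_instance

-- ===== CLAIM =====
def Claim_equal_map_service_id_to_schedule : Prop := ∀ (service_row_local : List (String × String)), Dom_map_service_id_to_schedule service_row_local → Spec_map_service_id_to_schedule service_row_local (map_service_id_to_schedule service_row_local)

-- ===== LEMMAS AND PROOFS =====

-- Both programs depend on the row only through the seven booleans "is this day served";
-- for every combination of those booleans A's chain equals B's mask lookup (128 cases).
set_option maxRecDepth 8192 in
theorem pv_bools_eq : ∀ (b0 b1 b2 b3 b4 b5 b6 : Bool),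
    pvChainA (pvDaysA.filter (fun day =>
      [("monday", b0), ("tuesday", b1), ("wednesday", b2), ("thursday", b3),
       ("friday", b4), ("saturday", b5), ("sunday", b6)].foldl
        (fun acc q => if q.1 = day then q.2 else acc) false))
  = PySem.Dict.getD (PySem.Dict.mk pvLabelsB)
      ((PySem.List.enumerate pvDaysB).foldl
        (fun m p =>
          if [("monday", b0), ("tuesday", b1), ("wednesday", b2), ("thursday", b3),
              ("friday", b4), ("saturday", b5), ("sunday", b6)].foldl
               (fun acc q => if q.1 = p.2 then q.2 else acc) false
          then PySem.Int.bor m ((1 : Int) <<< p.1.toNat) else m) 0)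
      "Special" := by decide

theorem map_service_id_to_schedule_spec : Claim_equal_map_service_id_to_schedule := by
  intro row _
  show map_service_id_to_schedule row = map_service_id_to_schedule_alt row
  unfold map_service_id_to_schedule map_service_id_to_schedule_alt
  have h := pv_bools_eq
    (PySem.Dict.getD (PySem.Dict.mk row) "monday" "0" == "1")
    (PySem.Dict.getD (PySem.Dict.mk row) "tuesday" "0" == "1")
    (PySem.Dict.getD (PySem.Dict.mk row) "wednesday" "0" == "1")
    (PySem.Dict.getD (PySem.Dict.mk row) "thursday" "0" == "1")
    (PySem.Dict.getD (PySem.Dict.mk row) "friday" "0" == "1")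
    (PySem.Dict.getD (PySem.Dict.mk row) "saturday" "0" == "1")
    (PySem.Dict.getD (PySem.Dict.mk row) "sunday" "0" == "1")
  simpa [pvDaysA, pvDaysB, List.filter, PySem.List.enumerate, List.foldl] using h
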